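-- pv_equiv track=rewrite | github.com/kelvinhuang0327/number-pattern-research | tools/analyze_prediction_115000019.py | markov_orthogonal_bet
-- ===== SOURCE A (Python) =====
-- from collections import Counter
--
-- MAX_NUM = 49
--
-- PICK = 6
--
-- def markov_orthogonal_bet(history, exclude=None, markov_window=30):
--     """Markov orthogonal bet - transition matrix conditional probability"""
--     exclude = exclude or set()
--     window = min(markov_window, len(history))
--     recent = history[-window:]
--
--     transitions = Counter()
--     for i in range(len(recent) - 1):
--         for p in recent[i]['numbers']:
--             for n in recent[i + 1]['numbers']:
--                 transitions[(p, n)] += 1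
--
--     if len(history) < 2:
--         candidates = [n for n in range(1, MAX_NUM + 1) if n not in exclude]
--         return sorted(candidates[:6])
--
--     scores = Counter()
--     for prev_num in history[-1]['numbers']:
--         for n in range(1, MAX_NUM + 1):
--             scores[n] += transitions.get((prev_num, n), 0)
--
--     candidates = [(n, scores[n]) for n in range(1, MAX_NUM + 1) if n not in exclude]
--     candidates.sort(key=lambda x: -x[1])
--
--     selected = [n for n, _ in candidates[:PICK]]
--     if len(selected) < PICK:
--         remaining = [n for n in range(1, MAX_NUM + 1) if n not in exclude and n not in selected]
--         selected.extend(remaining[:PICK - len(selected)])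
--
--     return sorted(selected[:PICK])
-- ===== SOURCE B (Python) =====
-- from collections import Counter
--
-- MAX_NUM = 49
--
-- PICK = 6
--
-- def markov_orthogonal_bet(history, exclude=None, markov_window=30):
--     """Markov orthogonal bet - one-pass scoring over consecutive window pairs
--     (no full (p, n) transition matrix; same result)."""
--     exclude = exclude or set()
--     if len(history) < 2:
--         return [n for n in range(1, MAX_NUM + 1) if n not in exclude][:PICK]
--     window = min(markov_window, len(history))
--     recent = history[-window:]
--     last_counts = Counter(history[-1]['numbers'])
--     # score[n] = sum over i of w_i * (occurrences of n in recent[i+1]) where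
--     # w_i = sum over p in recent[i] of multiplicity of p in the last draw.
--     scores = Counter()
--     for i in range(len(recent) - 1):
--         w = sum(last_counts[p] for p in recent[i]['numbers'])
--         for n in recent[i + 1]['numbers']:
--             scores[n] += w
--     candidates = sorted((n for n in range(1, MAX_NUM + 1) if n not in exclude),
--                         key=lambda n: -scores[n])
--     return sorted(candidates[:PICK])
-- ===== Notes on version B (the rewrite author's own statement) =====
-- stated objective: alternative
-- what changed: B never builds the full (p,n) transition Counter: in one pass over consecutive window pairs it computes a weight w_i (overlap-with-multiplicity of recent[i] with the last draw) and adds w_i to scores[n] per occurrence of n in recent[i+1]; it also drops A's dead top-up branch, which can never add anything.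
import Mathlib
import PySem

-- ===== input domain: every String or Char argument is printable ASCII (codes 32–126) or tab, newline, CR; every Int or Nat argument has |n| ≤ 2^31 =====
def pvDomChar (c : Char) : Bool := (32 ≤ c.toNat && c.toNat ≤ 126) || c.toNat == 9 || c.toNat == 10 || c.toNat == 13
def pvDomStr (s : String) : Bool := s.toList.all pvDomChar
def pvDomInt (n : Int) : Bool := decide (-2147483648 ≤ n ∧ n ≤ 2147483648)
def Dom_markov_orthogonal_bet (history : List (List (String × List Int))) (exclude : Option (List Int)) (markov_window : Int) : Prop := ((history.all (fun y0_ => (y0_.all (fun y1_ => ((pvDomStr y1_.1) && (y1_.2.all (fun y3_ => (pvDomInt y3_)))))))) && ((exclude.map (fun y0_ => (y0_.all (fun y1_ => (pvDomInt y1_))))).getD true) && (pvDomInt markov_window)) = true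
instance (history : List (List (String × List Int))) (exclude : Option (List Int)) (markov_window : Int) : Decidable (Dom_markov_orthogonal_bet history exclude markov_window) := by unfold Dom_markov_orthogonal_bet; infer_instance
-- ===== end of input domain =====

-- B replaces A's full (p,n) transition Counter by a one-pass weighted scoring over consecutive
-- window pairs (objective: alternative algorithm; A's dead top-up branch is dropped).

-- shared data accessor: draw['numbers'] (dict lookup = first matching key)
def pvNums (e : List (String × List Int)) : List Int :=
  match e.find? (fun p => p.1 == "numbers") with
  | some p => p.2
  | none => []

-- ===== PORT A =====
def markov_orthogonal_bet (history : List (List (String × List Int))) (exclude : Option (List Int)) (markov_window : Int) : List Int :=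
  -- 'exclude = exclude or set()': None (and the falsy []) become the empty set; membership is unchanged
  let excl : List Int := exclude.getD []
  let window : Int := min markov_window (history.length : Int)
  let recent : List (List (String × List Int)) := PySem.List.slice history (some (-window)) none
  let transitions : PySem.Dict (Int × Int) Int :=
    (List.range (recent.length - 1)).foldl
      (fun t i =>
        (pvNums (recent.getD i [])).foldl
          (fun t p =>
            (pvNums (recent.getD (i + 1) [])).foldl
              (fun t n => t.modify (p, n) 0 (· + 1)) t) t)
      PySem.Dict.empty
  if history.length < 2 then
    let candidates : List Int := (PySem.List.pyRange 1 50).filter (fun n => !(excl.contains n))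
    PySem.List.sorted (candidates.take 6) (fun x => x)
  else
    let scores : PySem.Dict Int Int :=
      (pvNums (PySem.List.pyGetD history (-1) [])).foldl
        (fun s prev_num =>
          (PySem.List.pyRange 1 50).foldl
            (fun s n => s.modify n 0 (· + transitions.getD (prev_num, n) 0)) s)
        PySem.Dict.empty
    let candidates : List (Int × Int) :=
      ((PySem.List.pyRange 1 50).filter (fun n => !(excl.contains n))).map (fun n => (n, scores.getD n 0))
    let candidates := PySem.List.sorted candidates (fun x => -x.2)
    let selected : List Int := (candidates.take 6).map (fun x => x.1)
    let selected : List Int :=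
      if selected.length < 6 then
        selected ++ ((PySem.List.pyRange 1 50).filter
          (fun n => !(excl.contains n) && !(selected.contains n))).take (6 - selected.length)
      else selected
    PySem.List.sorted (selected.take 6) (fun x => x)

-- ===== PORT B =====
def markov_orthogonal_bet_alt (history : List (List (String × List Int))) (exclude : Option (List Int)) (markov_window : Int) : List Int :=
  let excl : List Int := exclude.getD []
  if history.length < 2 then
    ((PySem.List.pyRange 1 50).filter (fun n => !(excl.contains n))).take 6
  else
    let window : Int := min markov_window (history.length : Int)
    let recent : List (List (String × List Int)) := PySem.List.slice history (some (-window)) none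
    let lastCounts : PySem.Dict Int Int := PySem.Dict.counter (pvNums (PySem.List.pyGetD history (-1) []))
    let scores : PySem.Dict Int Int :=
      (List.range (recent.length - 1)).foldl
        (fun sc i =>
          let w : Int := ((pvNums (recent.getD i [])).map (fun p => lastCounts.getD p 0)).sum
          (pvNums (recent.getD (i + 1) [])).foldl (fun sc n => sc.modify n 0 (· + w)) sc)
        PySem.Dict.empty
    let candidates : List Int :=
      PySem.List.sorted ((PySem.List.pyRange 1 50).filter (fun n => !(excl.contains n)))
        (fun n => -(scores.getD n 0))
    PySem.List.sorted (candidates.take 6) (fun x => x)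

-- ===== PRECONDITION & SPEC =====
-- Pre_ excludes exactly the inputs on which A raises KeyError: with at least two draws, every
-- draw of the consulted window (a suffix of history) and the last draw must carry the 'numbers' key.
def Pre_markov_orthogonal_bet (history : List (List (String × List Int))) (exclude : Option (List Int)) (markov_window : Int) : Prop :=
  2 ≤ history.length →
    ((PySem.List.slice history (some (-(min markov_window (history.length : Int)))) none).all
        (fun e => e.any (fun p => p.1 == "numbers")) = true
      ∧ (PySem.List.pyGetD history (-1) []).any (fun p => p.1 == "numbers") = true)
instance (history : List (List (String × List Int))) (exclude : Option (List Int)) (markov_window : Int) : Decidable (Pre_markov_orthogonal_bet history exclude markov_window) := by unfold Pre_markov_orthogonal_bet; infer_instance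

def pvWitness_markov_orthogonal_bet : (List (List (String × List Int))) × Option (List Int) × Int :=
  ([[("numbers", [1, 2, 3])], [("numbers", [2, 5])]], none, 30)

def Spec_markov_orthogonal_bet (history : List (List (String × List Int))) (exclude : Option (List Int)) (markov_window : Int) (out : List Int) : Prop := out = markov_orthogonal_bet_alt history exclude markov_window
instance (history : List (List (String × List Int))) (exclude : Option (List Int)) (markov_window : Int) (out : List Int) : Decidable (Spec_markov_orthogonal_bet history exclude markov_window out) := by unfold Spec_markov_orthogonal_bet; infer_instance

-- ===== CLAIM (what is proved, stated in full; the proofs are below) =====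
def Claim_equal_markov_orthogonal_bet : Prop := ∀ (history : List (List (String × List Int))) (exclude : Option (List Int)) (markov_window : Int), Dom_markov_orthogonal_bet history exclude markov_window → Pre_markov_orthogonal_bet history exclude markov_window → Spec_markov_orthogonal_bet history exclude markov_window (markov_orthogonal_bet history exclude markov_window)

-- ===== LEMMAS AND PROOFS =====


-- counting pairs emitted by the inner double loop of A's transition builder
lemma pv_count_pair_map (a p0 n0 : Int) (B : List Int) :
    (B.map (fun n => (a, n))).count (p0, n0) = if a = p0 then B.count n0 else 0 := by
  induction B with
  | nil => simp
  | cons b B ih =>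
    simp only [List.map_cons, List.count_cons, ih, beq_iff_eq, Prod.mk.injEq]
    split_ifs <;> simp_all

lemma pv_pair_count (A B : List Int) (t : PySem.Dict (Int × Int) Int) (p0 n0 : Int) :
    (A.foldl (fun t p => B.foldl (fun t n => t.modify (p, n) 0 (· + 1)) t) t).getD (p0, n0) 0
      = t.getD (p0, n0) 0 + (A.count p0 : Int) * (B.count n0 : Int) := by
  induction A generalizing t with
  | nil => simp
  | cons a A ih =>
    have hinner : (B.foldl (fun t n => t.modify (a, n) 0 (· + 1)) t)
        = (B.map (fun n => (a, n))).foldl (fun t x => t.modify x 0 (· + 1)) t := by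
      rw [List.foldl_map]
    rw [List.foldl_cons, ih, hinner, PySem.Dict.getD_foldl_modify_add_one,
      pv_count_pair_map, List.count_cons]
    by_cases h : a = p0
    · subst h
      simp only [beq_self_eq_true, if_true]
      push_cast
      ring
    · have h' : (p0 == a) = false := by simp [Ne.symm h]
      simp [h]

lemma pv_trans_char (N : Nat → List Int) (k : Nat) (t : PySem.Dict (Int × Int) Int) (p0 n0 : Int) :
    ((List.range k).foldl
        (fun t i => (N i).foldl (fun t p => (N (i + 1)).foldl (fun t n => t.modify (p, n) 0 (· + 1)) t) t) t).getD (p0, n0) 0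
      = t.getD (p0, n0) 0
        + ((List.range k).map (fun i => ((N i).count p0 : Int) * ((N (i + 1)).count n0 : Int))).sum := by
  induction k with
  | zero => simp
  | succ k ih =>
    rw [List.range_succ, List.foldl_append, List.map_append, List.sum_append]
    simp only [List.foldl_cons, List.foldl_nil, List.map_cons, List.map_nil, List.sum_cons,
      List.sum_nil]
    rw [pv_pair_count, ih]
    ring

-- A's scores loop: adding g n at key n over a Nodup index list
lemma pv_getD_modify_addf (R : List Int) (hR : R.Nodup) (g : Int → Int) (s : PySem.Dict Int Int) (n0 : Int) :
    (R.foldl (fun s n => s.modify n 0 (fun v => v + g n)) s).getD n0 0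
      = s.getD n0 0 + if n0 ∈ R then g n0 else 0 := by
  induction R generalizing s with
  | nil => simp
  | cons r R ih =>
    rw [List.foldl_cons, ih (List.nodup_cons.mp hR).2]
    by_cases hr : n0 = r
    · subst hr
      have hnr : n0 ∉ R := (List.nodup_cons.mp hR).1
      simp [hnr, PySem.Dict.getD_modify_self]
    · rw [PySem.Dict.getD_modify_of_ne _ _ _ hr]
      simp [List.mem_cons, hr]

lemma pv_scoresA_char (T : Int → Int → Int) (L : List Int) (s : PySem.Dict Int Int) (n0 : Int)
    (h : n0 ∈ PySem.List.pyRange 1 50) :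
    (L.foldl (fun s p => (PySem.List.pyRange 1 50).foldl (fun s n => s.modify n 0 (· + T p n)) s) s).getD n0 0
      = s.getD n0 0 + (L.map (fun p => T p n0)).sum := by
  induction L generalizing s with
  | nil => simp
  | cons p L ih =>
    rw [List.foldl_cons, ih, pv_getD_modify_addf _ (by decide) (fun n => T p n) s n0]
    simp only [List.map_cons, List.sum_cons, if_pos h]
    ring

-- B's inner loop: add the constant w once per occurrence
lemma pv_getD_modify_const (Lst : List Int) (w : Int) (s : PySem.Dict Int Int) (n0 : Int) :
    (Lst.foldl (fun s n => s.modify n 0 (fun v => v + w)) s).getD n0 0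
      = s.getD n0 0 + w * (Lst.count n0 : Int) := by
  induction Lst generalizing s with
  | nil => simp
  | cons n Lst ih =>
    rw [List.foldl_cons, ih, List.count_cons]
    by_cases hn : n0 = n
    · subst hn
      rw [PySem.Dict.getD_modify_self]
      simp only [beq_self_eq_true, if_true]
      push_cast
      ring
    · rw [PySem.Dict.getD_modify_of_ne _ _ _ hn]
      have h1 : (n0 == n) = false := by simp [hn]
      have h2 : (n == n0) = false := by simp [Ne.symm hn]
      simp [h2]

lemma pv_scoresB_char (N : Nat → List Int) (W : Nat → Int) (k : Nat) (s : PySem.Dict Int Int) (n0 : Int) :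
    ((List.range k).foldl (fun s i => (N (i + 1)).foldl (fun s n => s.modify n 0 (· + W i)) s) s).getD n0 0
      = s.getD n0 0 + ((List.range k).map (fun i => W i * ((N (i + 1)).count n0 : Int))).sum := by
  induction k with
  | zero => simp
  | succ k ih =>
    rw [List.range_succ, List.foldl_append, List.map_append, List.sum_append]
    simp only [List.foldl_cons, List.foldl_nil, List.map_cons, List.map_nil, List.sum_cons,
      List.sum_nil]
    rw [pv_getD_modify_const, ih]
    ring

-- sum swap for lists
lemma pv_sum_swap (L : List Int) (I : List Nat) (a : Int → Nat → Int) :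
    (L.map (fun p => (I.map (fun i => a p i)).sum)).sum
      = (I.map (fun i => (L.map (fun p => a p i)).sum)).sum := by
  induction L with
  | nil => simp
  | cons p L ih =>
    simp only [List.map_cons, List.sum_cons, ih]
    rw [← PySem.List.sum_map_add_int]

-- count swap: both sides count the pairs (p, q) with p drawn from L, q from N, p = q
lemma pv_count_swap (L N : List Int) :
    (L.map (fun p => ((N.count p : Nat) : Int))).sum = (N.map (fun q => ((L.count q : Nat) : Int))).sum := by
  induction L with
  | nil => simp
  | cons a L ih =>
    simp only [List.map_cons, List.sum_cons, ih, List.count_cons]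
    push_cast
    rw [PySem.List.sum_map_add_int, PySem.List.sum_map_ite_one_zero]
    have hc : N.countP (fun q => a == q) = N.count a := by
      refine List.countP_congr ?_
      intro x _
      simp only [beq_iff_eq]
      exact eq_comm
    rw [hc]
    ring

-- the two score tables agree on every candidate number
set_option maxRecDepth 8192 in
lemma pv_scores_eq (recent : List (List (String × List Int))) (L : List Int) (n0 : Int)
    (h50 : n0 ∈ PySem.List.pyRange 1 50) :
    (L.foldl (fun s p => (PySem.List.pyRange 1 50).foldl (fun s n => s.modify n 0 (· +
        ((List.range (recent.length - 1)).foldl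
          (fun t i => (pvNums (recent.getD i [])).foldl
            (fun t p' => (pvNums (recent.getD (i + 1) [])).foldl
              (fun t n' => t.modify (p', n') 0 (· + 1)) t) t)
          PySem.Dict.empty).getD (p, n) 0)) s) PySem.Dict.empty).getD n0 0
    = ((List.range (recent.length - 1)).foldl
        (fun sc i => (pvNums (recent.getD (i + 1) [])).foldl
          (fun sc n => sc.modify n 0 (· +
            ((pvNums (recent.getD i [])).map (fun p => (PySem.Dict.counter L).getD p 0)).sum)) sc)
        PySem.Dict.empty).getD n0 0 := by
  rw [pv_scoresA_char _ L _ n0 h50,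
    pv_scoresB_char (fun i => pvNums (recent.getD i []))
      (fun i => ((pvNums (recent.getD i [])).map (fun p => (PySem.Dict.counter L).getD p 0)).sum)
      (recent.length - 1) PySem.Dict.empty n0]
  rw [show (PySem.Dict.empty : PySem.Dict Int Int).getD n0 0 = 0 from rfl, zero_add, zero_add]
  have hA : (L.map (fun p =>
      ((List.range (recent.length - 1)).foldl
          (fun t i => (pvNums (recent.getD i [])).foldl
            (fun t p' => (pvNums (recent.getD (i + 1) [])).foldl
              (fun t n' => t.modify (p', n') 0 (· + 1)) t) t)
          PySem.Dict.empty).getD (p, n0) 0)).sum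
      = (L.map (fun p => ((List.range (recent.length - 1)).map
          (fun i => (((pvNums (recent.getD i [])).count p : Nat) : Int)
            * (((pvNums (recent.getD (i + 1) [])).count n0 : Nat) : Int))).sum)).sum := by
    refine congrArg List.sum (List.map_congr_left ?_)
    intro p _
    rw [pv_trans_char (fun i => pvNums (recent.getD i [])) (recent.length - 1) PySem.Dict.empty p n0]
    rw [show (PySem.Dict.empty : PySem.Dict (Int × Int) Int).getD (p, n0) 0 = 0 from rfl, zero_add]
  rw [hA, pv_sum_swap L (List.range (recent.length - 1))
    (fun p i => (((pvNums (recent.getD i [])).count p : Nat) : Int)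
      * (((pvNums (recent.getD (i + 1) [])).count n0 : Nat) : Int))]
  refine congrArg List.sum (List.map_congr_left ?_)
  intro i _
  rw [List.sum_map_mul_right, pv_count_swap]
  congr 1
  refine congrArg List.sum (List.map_congr_left ?_)
  intro q _
  rw [PySem.Dict.getD_counter]

-- insertion preserved under an order-embedding of the elements
lemma pv_insertBy_map {a b : Type} (emb : a → b) (before : b → b → Bool) (before' : a → a → Bool)
    (hb : ∀ x y, before (emb x) (emb y) = before' x y) (x : a) (acc : List a) :
    PySem.List.insertBy before (emb x) (acc.map emb) = (PySem.List.insertBy before' x acc).map emb := by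
  induction acc with
  | nil => simp [PySem.List.insertBy]
  | cons y ys ih =>
    simp only [List.map_cons, PySem.List.insertBy, hb]
    split_ifs <;> simp [ih]

lemma pv_foldl_insertBy_map {a b : Type} (emb : a → b) (before : b → b → Bool) (before' : a → a → Bool)
    (hb : ∀ x y, before (emb x) (emb y) = before' x y) (l acc : List a) :
    (l.map emb).foldl (fun acc x => PySem.List.insertBy before x acc) (acc.map emb)
      = (l.foldl (fun acc x => PySem.List.insertBy before' x acc) acc).map emb := by
  induction l generalizing acc with
  | nil => simp
  | cons x l ih =>
    simp only [List.map_cons, List.foldl_cons]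
    rw [pv_insertBy_map emb before before' hb, ih]

-- sorting the (n, f n) pairs on -snd is sorting the n on -(f n), elementwise embedded
lemma pv_sorted_map_pairs (f : Int → Int) (l : List Int) :
    PySem.List.sorted (l.map (fun n => (n, f n))) (fun x => -x.2)
      = (PySem.List.sorted l (fun n => -(f n))).map (fun n => (n, f n)) := by
  rw [PySem.List.sorted_eq_foldl_insertBy, PySem.List.sorted_eq_foldl_insertBy]
  have h := pv_foldl_insertBy_map (fun n => (n, f n))
    (fun x y => decide ((-x.2) < (-y.2))) (fun x y => decide (-(f x) < -(f y)))
    (fun _ _ => rfl) l []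
  simpa using h

lemma pv_insertBy_congr {a : Type} (b1 b2 : a → a → Bool) (x : a) (acc : List a)
    (hx : ∀ y ∈ acc, b1 x y = b2 x y) :
    PySem.List.insertBy b1 x acc = PySem.List.insertBy b2 x acc := by
  induction acc with
  | nil => rfl
  | cons y ys ih =>
    simp only [PySem.List.insertBy]
    rw [hx y (by simp)]
    split_ifs with h
    · rfl
    · rw [ih (fun z hz => hx z (by simp [hz]))]

-- Python's sorted only looks at the key values of the list's members
lemma pv_sorted_key_congr {a : Type} (l : List a) (k1 k2 : a → Int) (h : ∀ x ∈ l, k1 x = k2 x) :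
    PySem.List.sorted l k1 = PySem.List.sorted l k2 := by
  rw [PySem.List.sorted_eq_foldl_insertBy, PySem.List.sorted_eq_foldl_insertBy]
  suffices haux : ∀ (l' acc : List a), (∀ x ∈ l', k1 x = k2 x) → (∀ x ∈ acc, k1 x = k2 x) →
      l'.foldl (fun acc x => PySem.List.insertBy (fun u v => decide (k1 u < k1 v)) x acc) acc
        = l'.foldl (fun acc x => PySem.List.insertBy (fun u v => decide (k2 u < k2 v)) x acc) acc by
    exact haux l [] h (by simp)
  intro l'
  induction l' with
  | nil => intro acc _ _; rfl
  | cons x l' ih =>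
    intro acc hl hacc
    simp only [List.foldl_cons]
    have hins : PySem.List.insertBy (fun u v => decide (k1 u < k1 v)) x acc
        = PySem.List.insertBy (fun u v => decide (k2 u < k2 v)) x acc := by
      refine pv_insertBy_congr _ _ x acc ?_
      intro y hy
      rw [hl x (by simp), hacc y hy]
    rw [hins]
    refine ih _ (fun z hz => hl z (by simp [hz])) ?_
    intro z hz
    rcases (PySem.List.mem_insertBy _ _ _ _).mp hz with h1 | h2
    · subst h1; exact hl z (by simp)
    · exact hacc z h2

-- the candidate pool (1..49 minus excludes) is strictly increasing, so sorting it is the identity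
lemma pv_early (excl : List Int) :
    PySem.List.sorted (((PySem.List.pyRange 1 50).filter (fun n => !(excl.contains n))).take 6) (fun x => x)
      = ((PySem.List.pyRange 1 50).filter (fun n => !(excl.contains n))).take 6 := by
  refine PySem.List.sorted_eq_self_of_pairwise _ _ ?_
  have hr : (PySem.List.pyRange 1 50).Pairwise (fun x y : Int => x ≤ y) := by decide
  have hsub : (((PySem.List.pyRange 1 50).filter (fun n => !(excl.contains n))).take 6).Sublist
      (PySem.List.pyRange 1 50) :=
    (List.take_sublist 6 _).trans List.filter_sublist
  exact hr.sublist hsub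

-- A's selection pipeline, with its dead top-up branch eliminated
lemma pv_A_main_select (excl : List Int) (f : Int → Int) :
    (let candidates : List (Int × Int) :=
        ((PySem.List.pyRange 1 50).filter (fun n => !(excl.contains n))).map (fun n => (n, f n));
      let candidates := PySem.List.sorted candidates (fun x => -x.2);
      let selected : List Int := (candidates.take 6).map (fun x => x.1);
      let selected : List Int :=
        if selected.length < 6 then
          selected ++ ((PySem.List.pyRange 1 50).filter
            (fun n => !(excl.contains n) && !(selected.contains n))).take (6 - selected.length)
        else selected;
      PySem.List.sorted (selected.take 6) (fun x => x))
    = PySem.List.sorted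
        ((PySem.List.sorted ((PySem.List.pyRange 1 50).filter (fun n => !(excl.contains n)))
          (fun n => -(f n))).take 6) (fun x => x) := by
  simp only []
  rw [pv_sorted_map_pairs f]
  rw [← List.map_take, List.map_map]
  have hfst : ((fun (x : Int × Int) => x.1) ∘ (fun n => (n, f n))) = id := rfl
  rw [hfst, List.map_id]
  split_ifs with h
  · have hlen : ((PySem.List.sorted ((PySem.List.pyRange 1 50).filter (fun n => !(excl.contains n)))
        (fun n => -(f n)))).length ≤ 6 := by
      rw [List.length_take] at h
      omega
    rw [List.take_of_length_le hlen] at h ⊢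
    have hfilter : ((PySem.List.pyRange 1 50).filter (fun n => !(excl.contains n)
        && !((PySem.List.sorted ((PySem.List.pyRange 1 50).filter (fun n => !(excl.contains n)))
              (fun n => -(f n))).contains n))) = [] := by
      rw [List.filter_eq_nil_iff]
      intro n hn
      by_cases he : n ∈ excl
      · simp [he]
      · have hb : 1 ≤ n ∧ n < 50 := by simpa [PySem.List.mem_pyRange_one] using hn
        simp [he, hb]
    rw [hfilter, List.take_nil, List.append_nil, List.take_of_length_le hlen]
  · rw [List.take_take, Nat.min_self]

-- ===== VERDICT (by name: the statement is the Claim_ definition above) =====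
theorem markov_orthogonal_bet_spec : Claim_equal_markov_orthogonal_bet := by
  intro history exclude markov_window _hdom _hpre
  unfold Spec_markov_orthogonal_bet
  by_cases hlen : history.length < 2
  · simp only [markov_orthogonal_bet, markov_orthogonal_bet_alt]
    rw [if_pos hlen, if_pos hlen]
    exact pv_early _
  · simp only [markov_orthogonal_bet, markov_orthogonal_bet_alt]
    rw [if_neg hlen, if_neg hlen]
    refine Eq.trans (pv_A_main_select (exclude.getD []) _) ?_
    congr 1
    congr 1
    refine pv_sorted_key_congr _ _ _ ?_
    intro n hn
    have h50 : n ∈ PySem.List.pyRange 1 50 := (List.mem_filter.mp hn).1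
    exact congrArg Neg.neg (pv_scores_eq _ _ n h50)
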